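-- pv_equiv track=rewrite | github.com/njiah/geneticSearch | NSA.py | assign_tables
-- ===== SOURCE A (Python) =====
-- def assign_tables(schedule, max_tables=25):
--     """
--     Assign participants to designated tables for each round.
--     If there are fewer participants than max_tables, some tables will remain unused.
--     """
--     table_assignments = []
--     for round_num, round_pairs in enumerate(schedule, start=1):
--         round_tables = {}
--         table_number = 1
--
--         for pair in round_pairs:
--             if table_number > max_tables:  # Ensure we don't exceed the number of tables
--                 break
--             round_tables[table_number] = f"{pair[0]} - {pair[1]} (Score: {pair[2]})"
--             table_number += 1
--
--         # Fill empty tables with "Unused"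
--         while table_number <= max_tables:
--             round_tables[table_number] = "Unused"
--             table_number += 1
--
--         table_assignments.append(round_tables)
--
--     return table_assignments
-- ===== SOURCE B (Python) =====
-- def assign_tables(schedule, max_tables=25):
--     """
--     Assign participants to designated tables for each round.
--     If there are fewer participants than max_tables, some tables will remain unused.
--     """
--     width = max(max_tables, 0)
--     result = []
--     for round_pairs in schedule:
--         labels = [f"{p[0]} - {p[1]} (Score: {p[2]})" for p in round_pairs]
--         padded = labels[:width] + ["Unused"] * (width - len(labels))
--         result.append(dict(enumerate(padded, start=1)))
--     return result
-- ===== Notes on version B (the rewrite author's own statement) =====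
-- stated objective: simpler
-- what changed: B replaces A's two-phase per-round loops (fill a dict while counting table numbers, then a while loop padding with 'Unused') with a single output-driven construction: format all pairs, truncate to the table count, pad with 'Unused' to the same width, and enumerate from 1.
import Mathlib
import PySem

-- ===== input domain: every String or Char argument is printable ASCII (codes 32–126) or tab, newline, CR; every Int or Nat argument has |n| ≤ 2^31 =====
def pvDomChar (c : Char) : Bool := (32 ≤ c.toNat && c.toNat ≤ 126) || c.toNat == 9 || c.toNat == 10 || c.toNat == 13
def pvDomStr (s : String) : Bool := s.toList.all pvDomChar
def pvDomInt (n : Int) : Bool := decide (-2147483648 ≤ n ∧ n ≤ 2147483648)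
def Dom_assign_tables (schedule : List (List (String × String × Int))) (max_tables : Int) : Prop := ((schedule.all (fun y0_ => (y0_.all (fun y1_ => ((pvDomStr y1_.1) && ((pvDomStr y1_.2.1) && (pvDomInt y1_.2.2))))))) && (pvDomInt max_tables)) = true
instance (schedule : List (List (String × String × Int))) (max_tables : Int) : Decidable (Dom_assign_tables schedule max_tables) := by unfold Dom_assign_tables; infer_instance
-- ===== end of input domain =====

-- B builds each round's table dict in one output-driven pass (format, truncate, pad, enumerate)
-- instead of A's fill-then-pad pair of loops; same cost, simpler shape.

-- ===== PORT A =====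
-- f"{pair[0]} - {pair[1]} (Score: {pair[2]})" (shared by both Pythons verbatim)
def pvFmt (p : String × String × Int) : String :=
  p.1 ++ " - " ++ p.2.1 ++ " (Score: " ++ PySem.Int.toStr p.2.2 ++ ")"

-- A's round_tables dict only ever receives FRESH keys (table_number strictly increases),
-- so the dict is ported directly as its items association list: insert of a fresh key appends.
def pvFillA (max_tables : Int) : List (String × String × Int) → List (Int × String) → Int → List (Int × String) × Int
  | [], rt, t => (rt, t)
  | p :: ps, rt, t =>
    if t > max_tables then (rt, t)
    else pvFillA max_tables ps (rt ++ [(t, pvFmt p)]) (t + 1)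

def pvPadA (max_tables : Int) (rt : List (Int × String)) (t : Int) : List (Int × String) :=
  if t ≤ max_tables then pvPadA max_tables (rt ++ [(t, "Unused")]) (t + 1) else rt
termination_by (max_tables + 1 - t).toNat
decreasing_by omega

def assign_tables (schedule : List (List (String × String × Int))) (max_tables : Int) : List (List (Int × String)) :=
  schedule.foldl (fun table_assignments round_pairs =>
    let st := pvFillA max_tables round_pairs [] 1
    table_assignments ++ [pvPadA max_tables st.1 st.2]) []

-- ===== PORT B =====
-- dict(enumerate(padded, start=1)) has distinct keys 1..len, so its items list is the enumerate list.
def assign_tables_alt (schedule : List (List (String × String × Int))) (max_tables : Int) : List (List (Int × String)) :=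
  let width : Int := max max_tables 0
  schedule.map (fun round_pairs =>
    let labels := round_pairs.map pvFmt
    let padded := PySem.List.slice labels none (some width) ++
      PySem.List.pyRepeat ["Unused"] (width - (labels.length : Int))
    PySem.List.enumerate padded 1)

-- ===== PRECONDITION & SPEC =====
def Spec_assign_tables (schedule : List (List (String × String × Int))) (max_tables : Int) (out : List (List (Int × String))) : Prop := out = assign_tables_alt schedule max_tables
instance (schedule : List (List (String × String × Int))) (max_tables : Int) (out : List (List (Int × String))) : Decidable (Spec_assign_tables schedule max_tables out) := by unfold Spec_assign_tables; infer_instance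

-- ===== CLAIM (what is proved, stated in full; the proofs are below) =====
def Claim_equal_assign_tables : Prop := ∀ (schedule : List (List (String × String × Int))) (max_tables : Int), Dom_assign_tables schedule max_tables → Spec_assign_tables schedule max_tables (assign_tables schedule max_tables)

-- ===== LEMMAS AND PROOFS =====

theorem pvFillA_spec (mt : Int) (ps : List (String × String × Int)) :
    ∀ (rt : List (Int × String)) (t : Int),
    pvFillA mt ps rt t =
      (rt ++ PySem.List.enumerate ((ps.map pvFmt).take (mt + 1 - t).toNat) t,
       t + ((min ps.length (mt + 1 - t).toNat : Nat) : Int)) := by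
  induction ps with
  | nil => intro rt t; simp [pvFillA, PySem.List.enumerate_nil]
  | cons p ps ih =>
    intro rt t
    by_cases h : t > mt
    · have h0 : (mt + 1 - t).toNat = 0 := by omega
      simp [pvFillA, h, h0, PySem.List.enumerate_nil]
    · have h1 : (mt + 1 - t).toNat = (mt + 1 - (t + 1)).toNat + 1 := by omega
      simp only [pvFillA, if_neg h, ih]
      rw [h1]
      simp only [List.map_cons, List.take_succ_cons, PySem.List.enumerate_cons,
        List.append_assoc, List.singleton_append, List.length_cons]
      simp only [Prod.mk.injEq]
      refine ⟨trivial, ?_⟩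
      push_cast; omega

theorem pvPadA_spec (mt : Int) : ∀ (n : Nat) (t : Int) (rt : List (Int × String)),
    (mt + 1 - t).toNat = n →
    pvPadA mt rt t = rt ++ PySem.List.enumerate (List.replicate (mt + 1 - t).toNat "Unused") t := by
  intro n
  induction n with
  | zero =>
    intro t rt hn
    rw [pvPadA, if_neg (by omega), hn]
    simp [PySem.List.enumerate_nil]
  | succ n ih =>
    intro t rt hn
    rw [pvPadA, if_pos (by omega), ih (t + 1) _ (by omega), hn]
    have h2 : (mt + 1 - (t + 1)).toNat = n := by omega
    rw [h2]
    simp [List.replicate_succ, PySem.List.enumerate_cons]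

theorem pvRoundEq (mt : Int) (pairs : List (String × String × Int)) :
    pvPadA mt (pvFillA mt pairs [] 1).1 (pvFillA mt pairs [] 1).2 =
      PySem.List.enumerate
        (PySem.List.slice (pairs.map pvFmt) none (some (max mt 0)) ++
          PySem.List.pyRepeat ["Unused"] (max mt 0 - (pairs.map pvFmt).length)) 1 := by
  rw [pvFillA_spec]
  dsimp only
  rw [List.nil_append, pvPadA_spec mt _ _ _ rfl,
      PySem.List.slice_to _ (le_max_right mt 0), PySem.List.pyRepeat_singleton,
      PySem.List.enumerate_append]
  have h1 : mt + 1 - 1 = mt := by ring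
  have hwn : (max mt 0).toNat = mt.toNat := by omega
  rw [h1, hwn]
  simp only [List.length_take, List.length_map]
  congr 1
  congr 1
  · congr 1
    omega
  · push_cast
    omega

theorem assign_tables_spec : Claim_equal_assign_tables := by
  intro schedule max_tables hdom
  clear hdom
  unfold Spec_assign_tables assign_tables assign_tables_alt
  simp only []
  induction schedule using List.reverseRecOn with
  | nil => rfl
  | append_singleton xs x ih =>
    rw [List.foldl_append, List.map_append, ih, List.foldl_cons, List.foldl_nil,
      List.map_singleton, pvRoundEq]
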